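-- pv_equiv track=rewrite | github.com/jteerlink/newsletter-generator | src/agents/content_format_optimizer.py | _convert_to_email_html
-- ===== SOURCE A (Python) =====
-- def _convert_to_email_html(html: str) -> str:
--     """Convert responsive HTML to email client compatible format"""
--     # Inline all styles for email compatibility
--     # This is a simplified version - in production, use tools like premailer
--
--     inline_styles = {
--         'body': 'font-family: Arial, sans-serif; line-height: 1.6; margin: 0; padding: 16px; font-size: 16px; color: #333;',
--         'h1': 'font-weight: 600; margin: 24px 0 12px 0; line-height: 1.3; font-size: 24px;',
--         'h2': 'font-weight: 600; margin: 24px 0 12px 0; line-height: 1.3; font-size: 20px;',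
--         'h3': 'font-weight: 600; margin: 24px 0 12px 0; line-height: 1.3; font-size: 18px;',
--         'p': 'margin-bottom: 16px; line-height: 1.7;',
--         'ul': 'padding-left: 20px; margin-bottom: 16px;',
--         'li': 'margin-bottom: 8px; line-height: 1.6;',
--         'pre': 'background: #f8f8f8; padding: 16px; border-radius: 6px; overflow-x: auto;',
--         'blockquote': 'border-left: 4px solid #007AFF; padding-left: 16px; margin: 16px 0; font-style: italic; color: #555;'
--     }
--
--     # Simple inline style injection
--     for tag, style in inline_styles.items():
--         html = html.replace(f'<{tag}>', f'<{tag} style="{style}">')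
--
--     return html
-- ===== SOURCE B (Python) =====
-- def _convert_to_email_html(html: str) -> str:
--     """Convert responsive HTML to email client compatible format (single-pass scanner)."""
--     heading = 'font-weight: 600; margin: 24px 0 12px 0; line-height: 1.3; font-size: {0}px;'
--     inline_styles = {
--         'body': 'font-family: Arial, sans-serif; line-height: 1.6; margin: 0; padding: 16px; font-size: 16px; color: #333;',
--         'h1': heading.format(24),
--         'h2': heading.format(20),
--         'h3': heading.format(18),
--         'p': 'margin-bottom: 16px; line-height: 1.7;',
--         'ul': 'padding-left: 20px; margin-bottom: 16px;',
--         'li': 'margin-bottom: 8px; line-height: 1.6;',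
--         'pre': 'background: #f8f8f8; padding: 16px; border-radius: 6px; overflow-x: auto;',
--         'blockquote': 'border-left: 4px solid #007AFF; padding-left: 16px; margin: 16px 0; font-style: italic; color: #555;'
--     }
--     out = []
--     i = 0
--     n = len(html)
--     while i < n:
--         c = html[i]
--         if c == '<':
--             j = html.find('>', i + 1)
--             if j != -1:
--                 tag = html[i + 1:j]
--                 style = inline_styles.get(tag)
--                 if style is not None:
--                     out.append(f'<{tag} style="{style}">')
--                     i = j + 1
--                     continue
--         out.append(c)
--         i += 1
--     return ''.join(out)
-- ===== Notes on version B (the rewrite author's own statement) =====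
-- stated objective: alternative
-- what changed: Instead of nine sequential full-string str.replace passes (one per tag), B makes a single left-to-right scan: at each '<' it reads up to the next '>', looks the tag up in the style dict, and emits either the styled tag or the original character.
import Mathlib
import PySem

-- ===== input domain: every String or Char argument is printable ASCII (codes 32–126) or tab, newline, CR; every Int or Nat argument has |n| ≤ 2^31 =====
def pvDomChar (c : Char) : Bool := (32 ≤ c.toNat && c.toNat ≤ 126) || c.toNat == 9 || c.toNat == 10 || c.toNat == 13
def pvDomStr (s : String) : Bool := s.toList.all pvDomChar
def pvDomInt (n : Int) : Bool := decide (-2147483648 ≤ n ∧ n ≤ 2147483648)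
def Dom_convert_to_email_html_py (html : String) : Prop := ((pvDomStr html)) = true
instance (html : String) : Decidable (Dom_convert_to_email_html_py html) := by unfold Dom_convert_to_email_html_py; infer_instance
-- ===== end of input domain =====

-- B replaces A's nine sequential full-string `.replace` passes by a single left-to-right scan
-- with a tag lookup at each '<' (objective: alternative — one pass instead of nine, same result).


-- ===== PORT A =====
-- A's inline_styles dict, written out literally as A does
def emailStyles : List (String × String) :=
  [("body", "font-family: Arial, sans-serif; line-height: 1.6; margin: 0; padding: 16px; font-size: 16px; color: #333;"),
   ("h1", "font-weight: 600; margin: 24px 0 12px 0; line-height: 1.3; font-size: 24px;"),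
   ("h2", "font-weight: 600; margin: 24px 0 12px 0; line-height: 1.3; font-size: 20px;"),
   ("h3", "font-weight: 600; margin: 24px 0 12px 0; line-height: 1.3; font-size: 18px;"),
   ("p", "margin-bottom: 16px; line-height: 1.7;"),
   ("ul", "padding-left: 20px; margin-bottom: 16px;"),
   ("li", "margin-bottom: 8px; line-height: 1.6;"),
   ("pre", "background: #f8f8f8; padding: 16px; border-radius: 6px; overflow-x: auto;"),
   ("blockquote", "border-left: 4px solid #007AFF; padding-left: 16px; margin: 16px 0; font-style: italic; color: #555;")]

-- A: for tag, style in inline_styles.items(): html = html.replace(f'<{tag}>', f'<{tag} style="{style}">')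
def convert_to_email_html_py (html : String) : String :=
  emailStyles.foldl
    (fun h p => PySem.Str.replace h ("<" ++ p.1 ++ ">") ("<" ++ p.1 ++ " style=\"" ++ p.2 ++ "\">"))
    html

-- ===== PORT B =====
-- B works on the character list: at each '<' read up to the next '>', look the tag up, emit.
-- B's dict: headings share one template (heading.format(n) in Source B)
def headingChars (n : List Char) : List Char :=
  "font-weight: 600; margin: 24px 0 12px 0; line-height: 1.3; font-size: ".toList ++ n ++ "px;".toList

def charStyles : List (List Char × List Char) :=
  [("body".toList, "font-family: Arial, sans-serif; line-height: 1.6; margin: 0; padding: 16px; font-size: 16px; color: #333;".toList),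
   ("h1".toList, headingChars "24".toList),
   ("h2".toList, headingChars "20".toList),
   ("h3".toList, headingChars "18".toList),
   ("p".toList, "margin-bottom: 16px; line-height: 1.7;".toList),
   ("ul".toList, "padding-left: 20px; margin-bottom: 16px;".toList),
   ("li".toList, "margin-bottom: 8px; line-height: 1.6;".toList),
   ("pre".toList, "background: #f8f8f8; padding: 16px; border-radius: 6px; overflow-x: auto;".toList),
   ("blockquote".toList, "border-left: 4px solid #007AFF; padding-left: 16px; margin: 16px 0; font-style: italic; color: #555;".toList)]

-- html.find('>', i+1) and the slice html[i+1:j]: chars before the first '>', and the rest after it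
def splitGt : List Char → Option (List Char × List Char)
  | [] => none
  | c :: t =>
    if c = '>' then some ([], t)
    else match splitGt t with
      | some (a, b) => some (c :: a, b)
      | none => none

theorem splitGt_length : ∀ {t a b : List Char}, splitGt t = some (a, b) → a.length + b.length + 1 = t.length := by
  intro t
  induction t with
  | nil => intro a b h; simp [splitGt] at h
  | cons c t ih =>
    intro a b h
    by_cases hc : c = '>'
    · simp [splitGt, hc] at h; simp [← h.1, ← h.2]
    · simp only [splitGt, if_neg hc] at h
      cases hs : splitGt t with
      | none => rw [hs] at h; simp at h
      | some p =>
        rw [hs] at h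
        cases p with
        | mk a' b' =>
          simp at h
          have := ih hs
          simp [← h.1, ← h.2]; omega

-- f'<{tag} style="{style}">'
def styleBlock (tag st : List Char) : List Char :=
  '<' :: (tag ++ (" style=\"".toList ++ st ++ ['"', '>']))

def scanTags (d : List (List Char × List Char)) : List Char → List Char
  | [] => []
  | c :: t =>
    if c = '<' then
      match h : splitGt t with
      | some (tag, rest) =>
        match d.lookup tag with
        | some st => styleBlock tag st ++ scanTags d rest
        | none => c :: scanTags d t
      | none => c :: scanTags d t
    else c :: scanTags d t
  termination_by l => l.length
  decreasing_by
  · have := splitGt_length h; simp; omega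
  · simp
  · simp
  · simp

def convert_to_email_html_py_alt (html : String) : String :=
  String.ofList (scanTags charStyles html.toList)

-- ===== PRECONDITION & SPEC =====
def Spec_convert_to_email_html_py (html : String) (out : String) : Prop := out = convert_to_email_html_py_alt html
instance (html : String) (out : String) : Decidable (Spec_convert_to_email_html_py html out) := by unfold Spec_convert_to_email_html_py; infer_instance

-- ===== CLAIM (what is proved, stated in full; the proofs are below) =====
def Claim_equal_convert_to_email_html_py : Prop := ∀ (html : String), Dom_convert_to_email_html_py html → Spec_convert_to_email_html_py html (convert_to_email_html_py html)

-- ===== LEMMAS AND PROOFS =====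

-- proof-side view of Python's str.replace with a pattern '<'::orest (leftmost, non-overlapping)
def rep (orest new : List Char) : List Char → List Char
  | [] => []
  | c :: t =>
    if c = '<' ∧ orest.isPrefixOf t then new ++ rep orest new (t.drop orest.length)
    else c :: rep orest new t
  termination_by l => l.length
  decreasing_by
  · simp
  · simp

theorem rep_eq_go (orest new : List Char) :
    ∀ (fuel : Nat) (l acc : List Char), l.length ≤ fuel →
      PySem.Chars.replace.go ('<' :: orest) new fuel l acc = acc.reverse ++ rep orest new l := by
  intro fuel
  induction fuel with
  | zero =>
    intro l acc h
    have hl : l = [] := List.length_eq_zero_iff.mp (Nat.le_zero.mp h)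
    subst hl
    simp [PySem.Chars.replace.go, rep]
  | succ fuel ih =>
    intro l acc h
    cases l with
    | nil => simp [PySem.Chars.replace.go, rep]
    | cons c t =>
      rw [PySem.Chars.replace.go]
      by_cases hp : ('<' :: orest).isPrefixOf (c :: t)
      · rw [if_pos hp]
        have hc : c = '<' ∧ orest.isPrefixOf t := by
          rw [List.isPrefixOf_cons₂] at hp
          simp at hp
          exact ⟨hp.1.symm, List.isPrefixOf_iff_prefix.mpr hp.2⟩
        have hd : (List.drop ('<' :: orest).length (c :: t)).length ≤ fuel := by
          simp at h ⊢; omega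
        rw [ih _ _ hd]
        rw [rep, if_pos hc]
        simp
      · rw [if_neg hp]
        have hc : ¬ (c = '<' ∧ orest.isPrefixOf t) := by
          intro hcc
          apply hp
          rw [List.isPrefixOf_cons₂]
          simp [hcc.1, hcc.2]
        have ht : t.length ≤ fuel := by simp at h; omega
        rw [ih _ _ ht]
        rw [rep, if_neg hc]
        simp

theorem replace_eq_rep (l orest new : List Char) :
    PySem.Chars.replace l ('<' :: orest) new = rep orest new l := by
  rw [PySem.Chars.replace, if_neg (by simp)]
  rw [rep_eq_go orest new l.length l [] (le_refl _)]
  simp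

def midC (st : List Char) : List Char := " style=\"".toList ++ st ++ ['"', '>']

theorem styleBlock_eq (tag st : List Char) : styleBlock tag st = '<' :: (tag ++ midC st) := rfl

theorem splitGt_none_iff (t : List Char) : splitGt t = none ↔ '>' ∉ t := by
  induction t with
  | nil => simp [splitGt]
  | cons c t ih =>
    by_cases hc : c = '>'
    · simp [splitGt, hc]
    · simp only [splitGt, if_neg hc]
      cases hs : splitGt t with
      | none => simp [List.mem_cons, ih.mp hs, Ne.symm hc]
      | some p =>
        have hmem : '>' ∈ t := by
          by_contra hn
          rw [ih.mpr hn] at hs; cases hs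
        simp [List.mem_cons, hmem]

theorem splitGt_spec : ∀ {t a b : List Char}, splitGt t = some (a, b) → t = a ++ '>' :: b ∧ '>' ∉ a := by
  intro t
  induction t with
  | nil => intro a b h; simp [splitGt] at h
  | cons c t ih =>
    intro a b h
    by_cases hc : c = '>'
    · simp [splitGt, hc] at h
      rcases h with ⟨h1, h2⟩
      subst hc h1 h2
      simp
    · simp only [splitGt, if_neg hc] at h
      cases hs : splitGt t with
      | none => rw [hs] at h; simp at h
      | some p =>
        rw [hs] at h
        cases p with
        | mk a' b' =>
          simp at h
          have := ih hs
          constructor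
          · simp [← h.1, ← h.2, this.1]
          · simp [← h.1]; exact ⟨Ne.symm hc, this.2⟩

theorem scanTags_no_gt (d : List (List Char × List Char)) :
    ∀ {l : List Char}, '>' ∉ l → scanTags d l = l := by
  intro l
  induction l with
  | nil => intro _; simp [scanTags]
  | cons c t ih =>
    intro h
    have hgt : '>' ∉ t := by simp [List.mem_cons] at h; exact h.2
    rw [scanTags]
    by_cases hlt : c = '<'
    · rw [if_pos hlt]
      subst hlt
      split
      · next tag rest hh =>
        rw [(splitGt_none_iff t).mpr hgt] at hh; cases hh
      · next => rw [ih hgt]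
    · rw [if_neg hlt, ih hgt]

theorem rep_no_gt (t new : List Char) :
    ∀ {l : List Char}, '>' ∉ l → rep (t ++ ['>']) new l = l := by
  intro l
  induction l with
  | nil => simp [rep]
  | cons c t ih =>
    intro h
    have hgt : '>' ∉ t := by simp [List.mem_cons] at h; exact h.2
    rw [rep, if_neg]
    · rw [ih hgt]
    · rintro ⟨-, hp⟩
      exact hgt ((List.isPrefixOf_iff_prefix.mp hp).subset (by simp))

theorem scanTags_copy (d : List (List Char × List Char)) :
    ∀ {m : List Char}, '<' ∉ m → ∀ x, scanTags d (m ++ x) = m ++ scanTags d x := by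
  intro m
  induction m with
  | nil => intro _ x; simp
  | cons c m ih =>
    intro h x
    have hc : c ≠ '<' := by simp [List.mem_cons] at h; exact Ne.symm h.1
    have hm : '<' ∉ m := by simp [List.mem_cons] at h; exact h.2
    rw [List.cons_append, scanTags, if_neg hc, ih hm x]
    simp

theorem rep_copy (orest new : List Char) :
    ∀ {m : List Char}, '<' ∉ m → ∀ x, rep orest new (m ++ x) = m ++ rep orest new x := by
  intro m
  induction m with
  | nil => intro _ x; simp
  | cons c m ih =>
    intro h x
    have hc : c ≠ '<' := by simp [List.mem_cons] at h; exact Ne.symm h.1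
    have hm : '<' ∉ m := by simp [List.mem_cons] at h; exact h.2
    rw [List.cons_append, rep, if_neg (by rintro ⟨hcc, -⟩; exact hc hcc), ih hm x]
    simp

theorem rep_block (orest new brest x : List Char)
    (h1 : '<' ∉ brest) (h2 : orest.length ≤ brest.length) (h3 : ¬ orest.isPrefixOf brest) :
    rep orest new (('<' :: brest) ++ x) = '<' :: brest ++ rep orest new x := by
  rw [List.cons_append, rep, if_neg]
  · rw [rep_copy orest new h1 x]
    simp
  · rintro ⟨-, hp⟩
    rw [List.isPrefixOf_iff_prefix] at hp h3
    exact h3 ((List.isPrefix_append_of_length h2).mp hp)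

theorem prefix_tag_gt {t g : List Char} (z : List Char) (ht : '>' ∉ t) (hg : '>' ∉ g) (hne : t ≠ g) :
    ¬ (t ++ ['>']).isPrefixOf (g ++ '>' :: z) := by
  have aux : ∀ (t : List Char), ∀ (g : List Char), '>' ∉ t → '>' ∉ g → t ≠ g →
      ¬ (t ++ ['>']).isPrefixOf (g ++ '>' :: z) := by
    intro t
    induction t with
    | nil =>
      intro g ht hg hne hp
      cases g with
      | nil => exact hne rfl
      | cons d g' =>
        rw [List.nil_append, List.cons_append, List.isPrefixOf_cons₂] at hp
        simp at hp
        exact hg (List.mem_cons.mpr (Or.inl hp))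
    | cons c t' ih =>
      intro g ht hg hne hp
      cases g with
      | nil =>
        rw [List.cons_append, List.nil_append, List.isPrefixOf_cons₂] at hp
        simp at hp
        exact ht (List.mem_cons.mpr (Or.inl hp.1.symm))
      | cons d g' =>
        rw [List.cons_append, List.cons_append, List.isPrefixOf_cons₂] at hp
        simp at hp
        have ht' : '>' ∉ t' := by simp [List.mem_cons] at ht; exact ht.2
        have hg' : '>' ∉ g' := by simp [List.mem_cons] at hg; exact hg.2
        have hne' : t' ≠ g' := fun hh => hne (by rw [hp.1, hh])
        exact ih g' ht' hg' hne' (List.isPrefixOf_iff_prefix.mpr hp.2)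
  exact aux t g ht hg hne

theorem prefix_tag_lt {t g : List Char} (w : List Char) (ht1 : '<' ∉ t) (ht2 : '>' ∉ t)
    (hg1 : '<' ∉ g) (hg2 : '>' ∉ g) :
    ¬ (t ++ ['>']).isPrefixOf (g ++ '<' :: w) := by
  have aux : ∀ (t : List Char), ∀ (g : List Char), '<' ∉ t → '>' ∉ t → '<' ∉ g → '>' ∉ g →
      ¬ (t ++ ['>']).isPrefixOf (g ++ '<' :: w) := by
    intro t
    induction t with
    | nil =>
      intro g ht1 ht2 hg1 hg2 hp
      cases g with
      | nil =>
        rw [List.nil_append, List.nil_append, List.isPrefixOf_cons₂] at hp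
        simp at hp
      | cons d g' =>
        rw [List.nil_append, List.cons_append, List.isPrefixOf_cons₂] at hp
        simp at hp
        exact hg2 (List.mem_cons.mpr (Or.inl hp))
    | cons c t' ih =>
      intro g ht1 ht2 hg1 hg2 hp
      cases g with
      | nil =>
        rw [List.cons_append, List.nil_append, List.isPrefixOf_cons₂] at hp
        simp at hp
        exact ht1 (List.mem_cons.mpr (Or.inl hp.1.symm))
      | cons d g' =>
        rw [List.cons_append, List.cons_append, List.isPrefixOf_cons₂] at hp
        simp at hp
        have ht1' : '<' ∉ t' := by simp [List.mem_cons] at ht1; exact ht1.2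
        have ht2' : '>' ∉ t' := by simp [List.mem_cons] at ht2; exact ht2.2
        have hg1' : '<' ∉ g' := by simp [List.mem_cons] at hg1; exact hg1.2
        have hg2' : '>' ∉ g' := by simp [List.mem_cons] at hg2; exact hg2.2
        exact ih g' ht1' ht2' hg1' hg2' (List.isPrefixOf_iff_prefix.mpr hp.2)
  exact aux t g ht1 ht2 hg1 hg2

theorem scanTags_lt_head (d : List (List Char × List Char)) (m : List Char) :
    ∃ w, scanTags d ('<' :: m) = '<' :: w := by
  rw [scanTags, if_pos rfl]
  cases hs : splitGt m with
  | none => exact ⟨scanTags d m, rfl⟩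
  | some p =>
    cases hl : d.lookup p.1 with
    | none => exact ⟨scanTags d m, by simp [hl]⟩
    | some st => exact ⟨p.1 ++ (" style=\"".toList ++ st ++ ['"', '>']) ++ scanTags d p.2, by simp [hl, styleBlock]⟩

theorem exists_first_mem {a : Char} : ∀ {l : List Char}, a ∈ l → ∃ s t, l = s ++ a :: t ∧ a ∉ s := by
  intro l
  induction l with
  | nil => intro h; cases h
  | cons c t ih =>
    intro h
    by_cases hc : a = c
    · exact ⟨[], t, by simp [hc], by simp⟩
    · have hm : a ∈ t := by
        rcases List.mem_cons.mp h with h1 | h1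
        · exact absurd h1 hc
        · exact h1
      obtain ⟨ss, tt, h1, h2⟩ := ih hm
      exact ⟨c :: ss, tt, by simp [h1], by simp [List.mem_cons, hc, h2]⟩

theorem lookup_append_none {l1 l2 : List (List Char × List Char)} {g : List Char}
    (h : l1.lookup g = none) : (l1 ++ l2).lookup g = l2.lookup g := by
  induction l1 with
  | nil => simp
  | cons p l ih =>
    obtain ⟨k, v⟩ := p
    rw [List.lookup_cons] at h
    rw [List.cons_append, List.lookup_cons]
    by_cases hg : g = k
    · subst hg; simp at h
    · have hb := beq_false_of_ne hg
      simp only [hb] at h ⊢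
      exact ih h

theorem lookup_append_some {l1 l2 : List (List Char × List Char)} {g s : List Char}
    (h : l1.lookup g = some s) : (l1 ++ l2).lookup g = some s := by
  induction l1 with
  | nil => simp [List.lookup] at h
  | cons p l ih =>
    obtain ⟨k, v⟩ := p
    rw [List.lookup_cons] at h
    rw [List.cons_append, List.lookup_cons]
    by_cases hg : g = k
    · subst hg; simp at h ⊢
      exact h
    · have hb := beq_false_of_ne hg
      simp only [hb] at h ⊢
      exact ih h

theorem lookup_mem {d : List (List Char × List Char)} {g s : List Char}
    (h : d.lookup g = some s) : (g, s) ∈ d := by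
  induction d with
  | nil => simp [List.lookup] at h
  | cons p d ih =>
    obtain ⟨k, v⟩ := p
    rw [List.lookup_cons] at h
    by_cases hg : g = k
    · subst hg; simp at h
      simp [← h]
    · have hb := beq_false_of_ne hg
      simp only [hb] at h
      exact List.mem_cons_of_mem _ (ih h)

theorem lookup_none_of_not_key {d : List (List Char × List Char)} {g : List Char}
    (h : g ∉ d.map Prod.fst) : d.lookup g = none := by
  induction d with
  | nil => rfl
  | cons p d ih =>
    have h1 : g ≠ p.1 := by simp at h; exact h.1
    have h2 : g ∉ d.map Prod.fst := by simp at h ⊢; exact h.2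
    rw [List.lookup_cons]
    have hb : (g == p.1) = false := beq_false_of_ne h1
    rw [hb, ih h2]

theorem scanTags_nil : ∀ (l : List Char), scanTags [] l = l := by
  intro l
  induction l with
  | nil => simp [scanTags]
  | cons c t ih =>
    rw [scanTags]
    by_cases hc : c = '<'
    · rw [if_pos hc]
      subst hc
      split
      · next tag rest hh => simp [List.lookup, ih]
      · next => rw [ih]
    · rw [if_neg hc, ih]

-- the decidable facts about the concrete table that the step lemma consumes
theorem cond_chars : ∀ p ∈ charStyles, '<' ∉ p.1 ∧ '>' ∉ p.1 ∧ '<' ∉ p.2 := by decide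

theorem cond_nodup : (charStyles.map Prod.fst).Nodup := by decide

set_option maxRecDepth 8192 in
theorem cond_block : ∀ p ∈ charStyles, ∀ q ∈ charStyles,
    (p.1 ++ ['>']).length ≤ (q.1 ++ midC q.2).length ∧ ¬ (p.1 ++ ['>']).isPrefixOf (q.1 ++ midC q.2) := by decide


theorem scanTags_cons_ne (d : List (List Char × List Char)) {c : Char} (r : List Char) (hc : c ≠ '<') :
    scanTags d (c :: r) = c :: scanTags d r := by
  rw [scanTags, if_neg hc]

theorem scanTags_eq_none (d : List (List Char × List Char)) {r : List Char} (hs : splitGt r = none) :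
    scanTags d ('<' :: r) = '<' :: scanTags d r := by
  rw [scanTags, if_pos rfl]
  split
  · next tag rest hh => rw [hs] at hh; cases hh
  · rfl

theorem scanTags_eq_some_none (d : List (List Char × List Char)) {r tag rest : List Char}
    (hs : splitGt r = some (tag, rest)) (hl : d.lookup tag = none) :
    scanTags d ('<' :: r) = '<' :: scanTags d r := by
  rw [scanTags, if_pos rfl]
  split
  · next tag' rest' hh =>
    rw [hs] at hh
    cases hh
    rw [hl]
  · next hh => rfl

theorem scanTags_eq_some_some (d : List (List Char × List Char)) {r tag rest st : List Char}
    (hs : splitGt r = some (tag, rest)) (hl : d.lookup tag = some st) :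
    scanTags d ('<' :: r) = styleBlock tag st ++ scanTags d rest := by
  rw [scanTags, if_pos rfl]
  split
  · next tag' rest' hh =>
    rw [hs] at hh
    cases hh
    rw [hl]
  · next hh => rw [hs] at hh; cases hh

theorem mid_no_lt {st : List Char} (h : '<' ∉ st) : '<' ∉ midC st := by
  intro hm
  rw [midC] at hm
  rcases List.mem_append.mp hm with h1 | h1
  · rcases List.mem_append.mp h1 with h2 | h2
    · exact absurd h2 (by decide)
    · exact h h2
  · exact absurd h1 (by decide)


-- one more replace pass over the single-pass result = the single pass with the tag added
theorem step (d : List (List Char × List Char)) (t st : List Char)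
    (ht1 : '<' ∉ t) (ht2 : '>' ∉ t) (htd : d.lookup t = none)
    (hd : ∀ p ∈ d, '<' ∉ p.1 ∧ '>' ∉ p.1 ∧ '<' ∉ p.2 ∧
          (t ++ ['>']).length ≤ (p.1 ++ midC p.2).length ∧ ¬ (t ++ ['>']).isPrefixOf (p.1 ++ midC p.2)) :
    ∀ l, rep (t ++ ['>']) (styleBlock t st) (scanTags d l) = scanTags (d ++ [(t, st)]) l := by
  have main : ∀ (n : Nat) (l : List Char), l.length ≤ n →
      rep (t ++ ['>']) (styleBlock t st) (scanTags d l) = scanTags (d ++ [(t, st)]) l := by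
    intro n
    induction n with
    | zero =>
      intro l h
      have hl : l = [] := List.length_eq_zero_iff.mp (Nat.le_zero.mp h)
      subst hl
      simp [scanTags, rep]
    | succ n ih =>
      intro l hlen
      cases l with
      | nil => simp [scanTags, rep]
      | cons c r =>
        have hrn : r.length ≤ n := by simp at hlen; omega
        by_cases hc : c = '<'
        · subst hc
          cases hs : splitGt r with
          | none =>
            have hgt : '>' ∉ r := (splitGt_none_iff r).mp hs
            rw [scanTags_eq_none d hs, scanTags_eq_none _ hs]
            rw [scanTags_no_gt d hgt, scanTags_no_gt _ hgt]
            rw [rep, if_neg]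
            · rw [rep_no_gt t (styleBlock t st) hgt]
            · rintro ⟨-, hpre⟩
              exact hgt ((List.isPrefixOf_iff_prefix.mp hpre).subset (by simp))
          | some p =>
            obtain ⟨tag, rest⟩ := p
            obtain ⟨hr, hgr⟩ := splitGt_spec hs
            have hrest : rest.length ≤ n := by
              have := splitGt_length hs; omega
            cases hl : d.lookup tag with
            | some s0 =>
              have hpd := hd _ (lookup_mem hl)
              rw [scanTags_eq_some_some d hs hl,
                  scanTags_eq_some_some _ hs (lookup_append_some hl)]
              rw [styleBlock_eq tag s0, rep_block]
              · rw [ih rest hrest]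
              · intro hm
                rcases List.mem_append.mp hm with h1 | h1
                · exact hpd.1 h1
                · exact mid_no_lt hpd.2.2.1 h1
              · exact hpd.2.2.2.1
              · exact hpd.2.2.2.2
            | none =>
              by_cases htag : tag = t
              · subst htag
                have hl' : (d ++ [(tag, st)]).lookup tag = some st := by
                  rw [lookup_append_none hl]
                  simp [List.lookup]
                rw [scanTags_eq_some_some _ hs hl', scanTags_eq_some_none d hs hl]
                rw [hr, scanTags_copy d ht1 ('>' :: rest),
                    scanTags_cons_ne d rest (by decide)]
                rw [rep, if_pos]
                · have hdrop : List.drop (tag ++ ['>']).length (tag ++ '>' :: scanTags d rest)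
                      = scanTags d rest := by
                    have he : tag ++ '>' :: scanTags d rest = (tag ++ ['>']) ++ scanTags d rest := by
                      simp
                    rw [he, List.drop_left]
                  rw [hdrop, ih rest hrest]
                · refine ⟨rfl, ?_⟩
                  have he : tag ++ '>' :: scanTags d rest = (tag ++ ['>']) ++ scanTags d rest := by
                    simp
                  rw [he]
                  exact List.isPrefixOf_iff_prefix.mpr (List.prefix_append _ _)
              · have hl' : (d ++ [(t, st)]).lookup tag = none := by
                  rw [lookup_append_none hl]
                  simp [List.lookup, beq_false_of_ne htag]
                rw [scanTags_eq_some_none d hs hl, scanTags_eq_some_none _ hs hl']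
                rw [rep, if_neg]
                · rw [ih r hrn]
                · rintro ⟨-, hpre⟩
                  rw [hr] at hpre
                  by_cases hlt : '<' ∈ tag
                  · obtain ⟨g1, g2, hg, hg1⟩ := exists_first_mem hlt
                    rw [hg] at hpre
                    have he : (g1 ++ '<' :: g2) ++ '>' :: rest = g1 ++ ('<' :: (g2 ++ '>' :: rest)) := by
                      simp
                    rw [he, scanTags_copy d hg1] at hpre
                    obtain ⟨w, hw⟩ := scanTags_lt_head d (g2 ++ '>' :: rest)
                    rw [hw] at hpre
                    have hg1gt : '>' ∉ g1 :=
                      fun hm => hgr (hg ▸ (List.mem_append.mpr (Or.inl hm)))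
                    exact prefix_tag_lt w ht1 ht2 hg1 hg1gt hpre
                  · rw [scanTags_copy d hlt ('>' :: rest),
                        scanTags_cons_ne d rest (by decide)] at hpre
                    exact prefix_tag_gt (scanTags d rest) ht2 hgr
                      (fun e => htag e.symm) hpre
        · rw [scanTags_cons_ne d r hc, scanTags_cons_ne _ r hc]
          rw [rep, if_neg (by rintro ⟨h1, -⟩; exact hc h1)]
          rw [ih r hrn]
  intro l
  exact main l.length l (le_refl _)

theorem master : ∀ (suf pre : List (List Char × List Char)), pre ++ suf = charStyles →
    ∀ l, suf.foldl (fun acc p => rep (p.1 ++ ['>']) (styleBlock p.1 p.2) acc) (scanTags pre l)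
      = scanTags charStyles l := by
  intro suf
  induction suf with
  | nil =>
    intro pre h l
    rw [List.foldl_nil, List.append_nil] at *
    rw [h]
  | cons p suf ih =>
    intro pre h l
    rw [List.foldl_cons]
    have hmem_p : p ∈ charStyles := by
      rw [← h]; exact List.mem_append.mpr (Or.inr List.mem_cons_self)
    have hsub : ∀ q ∈ pre, q ∈ charStyles := by
      intro q hq
      rw [← h]; exact List.mem_append.mpr (Or.inl hq)
    have hchars := cond_chars p hmem_p
    have hlk : pre.lookup p.1 = none := by
      apply lookup_none_of_not_key
      have hn := cond_nodup
      rw [← h] at hn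
      rw [List.map_append] at hn
      have hdisj := (List.nodup_append.mp hn).2.2
      intro hmem
      exact hdisj _ hmem _ (by simp) rfl
    have hstep := step pre p.1 p.2 hchars.1 hchars.2.1 hlk
      (fun q hq => ⟨(cond_chars q (hsub q hq)).1, (cond_chars q (hsub q hq)).2.1,
        (cond_chars q (hsub q hq)).2.2, (cond_block p hmem_p q (hsub q hq)).1,
        (cond_block p hmem_p q (hsub q hq)).2⟩)
    rw [hstep l]
    have h' : (pre ++ [p]) ++ suf = charStyles := by
      rw [List.append_assoc]; simpa using h
    have := ih (pre ++ [p]) h' l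
    simpa using this

theorem foldl_replace_toList (L : List (String × String)) : ∀ (h : String),
    (L.foldl (fun h p => PySem.Str.replace h ("<" ++ p.1 ++ ">") ("<" ++ p.1 ++ " style=\"" ++ p.2 ++ "\">")) h).toList
      = (L.map (fun p => (p.1.toList, p.2.toList))).foldl
          (fun acc q => rep (q.1 ++ ['>']) (styleBlock q.1 q.2) acc) h.toList := by
  induction L with
  | nil => intro h; simp
  | cons p L ih =>
    intro h
    rw [List.foldl_cons, List.map_cons, List.foldl_cons, ih]
    congr 1
    rw [PySem.Str.toList_replace]
    have hlt : ("<" : String).toList = ['<'] := rfl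
    have hgt : (">" : String).toList = ['>'] := rfl
    have hqt : ("\">" : String).toList = ['"', '>'] := rfl
    have hmid : (" style=\"" : String).toList = " style=\"".toList := rfl
    have hpat : ("<" ++ p.1 ++ ">").toList = '<' :: (p.1.toList ++ ['>']) := by
      rw [String.toList_append, String.toList_append, hlt, hgt]
      rfl
    have hout : ("<" ++ p.1 ++ " style=\"" ++ p.2 ++ "\">").toList
        = styleBlock p.1.toList p.2.toList := by
      rw [String.toList_append, String.toList_append, String.toList_append,
          String.toList_append, hlt, hqt, styleBlock]
      simp
    rw [hpat, hout, replace_eq_rep]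

set_option maxRecDepth 8192 in
theorem emailStyles_toChars :
    emailStyles.map (fun p => (p.1.toList, p.2.toList)) = charStyles := by decide

-- ===== VERDICT (by name: the statement is the Claim_ definition above) =====
theorem convert_to_email_html_py_spec : Claim_equal_convert_to_email_html_py := by
  intro html _
  unfold Spec_convert_to_email_html_py convert_to_email_html_py convert_to_email_html_py_alt
  apply String.toList_inj.mp
  rw [String.toList_ofList, foldl_replace_toList, emailStyles_toChars]
  have hm := master charStyles [] (by simp) html.toList
  rw [scanTags_nil html.toList] at hm
  exact hm
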